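-- pv_equiv track=rewrite | github.com/perng/apostal-solutions | tools/extract_exercises.py | build_chapter_ranges
-- ===== SOURCE A (Python) =====
-- from typing import List, Tuple, Optional
--
-- def build_chapter_ranges(starts: List[Tuple[int, int, str]], total_pages: int) -> List[Tuple[int, int, int, str]]:
--     """
--     Given chapter starts [(ch_num, start_idx, title)], build ranges
--     [(ch_num, start_idx, end_idx, title)].
--     """
--     ranges = []
--     if not starts:
--         return ranges
--     starts_sorted = sorted(starts, key=lambda x: x[1])  # by page
--     for idx, (ch, sp, title) in enumerate(starts_sorted):
--         ep = (starts_sorted[idx + 1][1] - 1) if idx + 1 < len(starts_sorted) else (total_pages - 1)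
--         if ep >= sp:
--             ranges.append((ch, sp, ep, title))
--     return ranges
-- ===== SOURCE B (Python) =====
-- def build_chapter_ranges(starts, total_pages):
--     """Single reverse pass: thread the next chapter's start page through an
--     accumulator instead of indexing ahead into the sorted list."""
--     starts_sorted = sorted(starts, key=lambda x: x[1])
--     out = []
--     next_start = total_pages
--     for ch, sp, title in reversed(starts_sorted):
--         ep = next_start - 1
--         if ep >= sp:
--             out.append((ch, sp, ep, title))
--         next_start = sp
--     out.reverse()
--     return out
-- ===== Notes on version B (the rewrite author's own statement) =====
-- stated objective: alternative
-- what changed: End pages are computed by a single reverse pass that threads the next chapter's start through an accumulator (building the result back-to-front and reversing), instead of enumerate with an index lookahead into the sorted list.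
import Mathlib
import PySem

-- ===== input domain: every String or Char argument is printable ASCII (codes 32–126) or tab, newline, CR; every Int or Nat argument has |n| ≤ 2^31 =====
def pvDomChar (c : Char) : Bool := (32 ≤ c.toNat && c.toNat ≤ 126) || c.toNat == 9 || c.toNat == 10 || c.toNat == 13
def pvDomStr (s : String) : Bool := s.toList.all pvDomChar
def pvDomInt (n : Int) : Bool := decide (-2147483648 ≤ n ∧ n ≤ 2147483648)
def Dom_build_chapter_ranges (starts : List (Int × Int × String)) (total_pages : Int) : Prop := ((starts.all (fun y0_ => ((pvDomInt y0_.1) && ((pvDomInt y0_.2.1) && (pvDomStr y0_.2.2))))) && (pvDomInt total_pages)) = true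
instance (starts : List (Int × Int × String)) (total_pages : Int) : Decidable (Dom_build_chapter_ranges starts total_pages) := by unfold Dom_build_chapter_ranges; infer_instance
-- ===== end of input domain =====

-- B replaces A's index lookahead by a single reverse pass threading the next start through an accumulator (alternative decomposition, same cost).

-- ===== PORT A =====
def build_chapter_ranges (starts : List (Int × Int × String)) (total_pages : Int) : List (Int × Int × Int × String) :=
  if starts = [] then []
  else
    let starts_sorted := PySem.List.sorted starts (fun x => x.2.1) false
    (PySem.List.enumerate starts_sorted 0).foldl
      (fun ranges p =>
        let idx := p.1
        let ch := p.2.1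
        let sp := p.2.2.1
        let title := p.2.2.2
        -- idx + 1 is in range whenever the guard holds, so the pyGetD default is never used
        let ep := if idx + 1 < (starts_sorted.length : Int)
                  then (PySem.List.pyGetD starts_sorted (idx + 1) (0, 0, "")).2.1 - 1
                  else total_pages - 1
        if ep ≥ sp then ranges ++ [(ch, sp, ep, title)] else ranges) []

-- ===== PORT B =====
def build_chapter_ranges_alt (starts : List (Int × Int × String)) (total_pages : Int) : List (Int × Int × Int × String) :=
  let starts_sorted := PySem.List.sorted starts (fun x => x.2.1) false
  let st := starts_sorted.reverse.foldl
    (fun (acc : List (Int × Int × Int × String) × Int) x =>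
      let ep := acc.2 - 1
      ((if ep ≥ x.2.1 then acc.1 ++ [(x.1, x.2.1, ep, x.2.2)] else acc.1), x.2.1))
    ([], total_pages)
  st.1.reverse

-- ===== PRECONDITION & SPEC =====
def Spec_build_chapter_ranges (starts : List (Int × Int × String)) (total_pages : Int) (out : List (Int × Int × Int × String)) : Prop := out = build_chapter_ranges_alt starts total_pages
instance (starts : List (Int × Int × String)) (total_pages : Int) (out : List (Int × Int × Int × String)) : Decidable (Spec_build_chapter_ranges starts total_pages out) := by unfold Spec_build_chapter_ranges; infer_instance

-- ===== CLAIM (what is proved, stated in full; the proofs are below) =====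
def Claim_equal_build_chapter_ranges : Prop := ∀ (starts : List (Int × Int × String)) (total_pages : Int), Dom_build_chapter_ranges starts total_pages → Spec_build_chapter_ranges starts total_pages (build_chapter_ranges starts total_pages)

-- ===== LEMMAS AND PROOFS =====

-- reference function: ranges of a (sorted) list, where `ns` is the start page of the
-- chapter following the last listed one (total_pages at top level)
def pvRef (ns : Int) : List (Int × Int × String) → List (Int × Int × Int × String)
  | [] => []
  | (ch, sp, t) :: rest =>
      let n : Int := match rest with | [] => ns | (_, sp2, _) :: _ => sp2
      (if n - 1 ≥ sp then [(ch, sp, n - 1, t)] else []) ++ pvRef ns rest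

lemma pvB_loop (l : List (Int × Int × String))
    (out : List (Int × Int × Int × String)) (ns : Int) :
    l.reverse.foldl
      (fun (acc : List (Int × Int × Int × String) × Int) x =>
        ((if acc.2 - 1 ≥ x.2.1 then acc.1 ++ [(x.1, x.2.1, acc.2 - 1, x.2.2)] else acc.1), x.2.1))
      (out, ns)
      = (out ++ (pvRef ns l).reverse,
         match l with | [] => ns | (_, sp, _) :: _ => sp) := by
  induction l generalizing out with
  | nil => simp [pvRef]
  | cons x xs ih =>
      obtain ⟨ch, sp, t⟩ := x
      simp only [List.reverse_cons, List.foldl_append, ih, List.foldl_cons, List.foldl_nil]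
      cases xs with
      | nil => simp [pvRef]; split <;> simp
      | cons y ys =>
          obtain ⟨ch2, sp2, t2⟩ := y
          simp [pvRef]; split <;> simp

lemma pvA_loop (tp : Int) (ss : List (Int × Int × String)) :
    ∀ (suf pre : List (Int × Int × String)) (n : Int)
      (acc : List (Int × Int × Int × String)),
    ss = pre ++ suf → n = (pre.length : Int) →
    (PySem.List.enumerate suf n).foldl
      (fun ranges p =>
        let idx := p.1
        let ch := p.2.1
        let sp := p.2.2.1
        let title := p.2.2.2
        let ep := if idx + 1 < (ss.length : Int)
                  then (PySem.List.pyGetD ss (idx + 1) (0, 0, "")).2.1 - 1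
                  else tp - 1
        if ep ≥ sp then ranges ++ [(ch, sp, ep, title)] else ranges) acc
      = acc ++ pvRef tp suf := by
  intro suf
  induction suf with
  | nil => intro pre n acc _ _; simp [PySem.List.enumerate, pvRef]
  | cons x xs ih =>
      intro pre n acc hsplit hn
      obtain ⟨ch, sp, t⟩ := x
      rw [PySem.List.enumerate_cons, List.foldl_cons]
      rw [ih (pre ++ [(ch, sp, t)]) (n + 1) _ (by simp [hsplit]) (by simp [hn])]
      cases xs with
      | nil =>
          have hc : ¬ (n + 1 < (ss.length : Int)) := by
            subst hsplit hn; simp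
          simp only [pvRef, hc, if_false, List.append_nil]
          split <;> simp
      | cons y ys =>
          obtain ⟨ch2, sp2, t2⟩ := y
          have hc : n + 1 < (ss.length : Int) := by
            subst hsplit hn; simp
          have hn1 : n + 1 = ((pre.length + 1 : Nat) : Int) := by
            rw [hn]; push_cast; ring
          have hget : PySem.List.pyGetD ss (n + 1) (0, 0, "") = (ch2, sp2, t2) := by
            subst hsplit
            rw [hn1, PySem.List.pyGetD_natCast]
            simp [List.getD]
          simp only [pvRef, hc, if_true, hget]
          split <;> simp

lemma pvA_eq_ref (starts : List (Int × Int × String)) (tp : Int) :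
    build_chapter_ranges starts tp
      = pvRef tp (PySem.List.sorted starts (fun x => x.2.1) false) := by
  unfold build_chapter_ranges
  by_cases h : starts = []
  · have h0 : PySem.List.sorted ([] : List (Int × Int × String)) (fun x => x.2.1) false = [] := rfl
    subst h
    simp [h0, pvRef]
  · simp only [h, if_false]
    have h1 := pvA_loop tp (PySem.List.sorted starts (fun x => x.2.1) false)
      (PySem.List.sorted starts (fun x => x.2.1) false) [] 0 []
      (by simp) (by simp)
    rw [h1, List.nil_append]

lemma pvB_eq_ref (starts : List (Int × Int × String)) (tp : Int) :
    build_chapter_ranges_alt starts tp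
      = pvRef tp (PySem.List.sorted starts (fun x => x.2.1) false) := by
  show (List.foldl
      (fun (acc : List (Int × Int × Int × String) × Int) x =>
        ((if acc.2 - 1 ≥ x.2.1 then acc.1 ++ [(x.1, x.2.1, acc.2 - 1, x.2.2)] else acc.1), x.2.1))
      ([], tp) (PySem.List.sorted starts (fun x => x.2.1) false).reverse).1.reverse
    = pvRef tp (PySem.List.sorted starts (fun x => x.2.1) false)
  rw [pvB_loop]
  simp

-- ===== VERDICT (by name: the statement is the Claim_ definition above) =====
theorem build_chapter_ranges_spec : Claim_equal_build_chapter_ranges := by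
  intro starts tp _
  unfold Spec_build_chapter_ranges
  rw [pvA_eq_ref, pvB_eq_ref]
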